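-- pv_equiv track=rewrite | github.com/ProjectBots/hil-cosim-integration | modbushil/registerhelpers.py | register_to_int
-- ===== SOURCE A (Python) =====
-- from typing import List
--
-- def register_to_int(regs: List[int]) -> int:
-- 	"""Convert a list of Modbus register values to a single integer.
--
-- 	:param regs: List of Modbus register values (16-bit unsigned integers)
-- 	:type regs: List[int]
-- 	:return: The combined integer value
-- 	:rtype: int
-- 	"""
-- 	result = 0
-- 	for i, reg in enumerate(regs):
-- 		result |= (reg & 0xFFFF) << (16 * i)
-- 	# account for signage (two's complement)
-- 	total_bits = 16 * len(regs)
-- 	sign_bit = 1 << (total_bits - 1)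
-- 	if result & sign_bit:
-- 		result -= 1 << total_bits
-- 	return result
-- ===== SOURCE B (Python) =====
-- def register_to_int(regs):
--     buf = bytearray()
--     for reg in regs:
--         buf += (reg & 0xFFFF).to_bytes(2, 'little')
--     return int.from_bytes(buf, 'little', signed=True)
-- ===== Notes on version B (the rewrite author's own statement) =====
-- stated objective: idiomatic
-- what changed: B packs each register's low 16 bits into a little-endian bytearray and decodes it in one step with int.from_bytes(..., signed=True), replacing A's shift/or accumulation loop and manual two's-complement sign branch.
import Mathlib
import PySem

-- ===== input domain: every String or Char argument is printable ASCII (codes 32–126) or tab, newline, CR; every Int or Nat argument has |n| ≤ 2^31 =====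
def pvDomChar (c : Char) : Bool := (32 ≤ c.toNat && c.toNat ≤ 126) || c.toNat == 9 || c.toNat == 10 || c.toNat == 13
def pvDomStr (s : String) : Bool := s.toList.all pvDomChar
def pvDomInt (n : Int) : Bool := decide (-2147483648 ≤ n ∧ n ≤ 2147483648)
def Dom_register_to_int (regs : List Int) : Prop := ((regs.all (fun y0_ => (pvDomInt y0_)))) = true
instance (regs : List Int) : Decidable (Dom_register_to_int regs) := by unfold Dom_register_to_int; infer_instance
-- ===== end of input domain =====

-- B packs each register's low 16 bits into a little-endian byte buffer and decodes it with a
-- single signed from_bytes step, replacing A's shift/or accumulation and manual sign branch (idiomatic).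


-- ===== PORT A =====
def register_to_int (regs : List Int) : Int :=
  let result := (PySem.List.enumerate regs 0).foldl
    (fun result iv => PySem.Int.bor result ((PySem.Int.band iv.2 0xFFFF) <<< (16 * iv.1).toNat)) 0
  -- sign_bit = 1 << (16*len(regs) - 1); on regs = [] Python raises ValueError (negative shift), excluded by Pre_
  let sign_bit : Int := 1 <<< (16 * regs.length - 1)
  if PySem.Int.band result sign_bit ≠ 0 then result - (1 <<< (16 * regs.length)) else result

-- ===== PORT B =====
def register_to_int_alt (regs : List Int) : Int :=
  -- buf += (reg & 0xFFFF).to_bytes(2, 'little'); to_bytes of 0 ≤ v < 2^16 is exactly [v % 256, v / 256]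
  let buf := regs.foldl (fun buf reg =>
    let v := PySem.Int.band reg 0xFFFF
    buf ++ [PySem.Int.mod v 256, PySem.Int.floordiv v 256]) []
  -- int.from_bytes(buf, 'little', signed=True): little-endian value, minus 2^bits when the top bit is set
  let raw := buf.foldr (fun b acc => b + 256 * acc) 0
  if 0 < buf.length ∧ 2 ^ (8 * buf.length - 1) ≤ raw then raw - 2 ^ (8 * buf.length) else raw

-- ===== PRECONDITION & SPEC =====
-- Pre_ excludes only the empty list, on which Python A raises ValueError (1 << -1, negative shift count).
def Pre_register_to_int (regs : List Int) : Prop := regs ≠ []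
instance (regs : List Int) : Decidable (Pre_register_to_int regs) := by unfold Pre_register_to_int; infer_instance
def pvWitness_register_to_int : List Int := ([1, 2])

def Spec_register_to_int (regs : List Int) (out : Int) : Prop := out = register_to_int_alt regs
instance (regs : List Int) (out : Int) : Decidable (Spec_register_to_int regs out) := by unfold Spec_register_to_int; infer_instance

-- ===== CLAIM (what is proved, stated in full; the proofs are below) =====
def Claim_equal_register_to_int : Prop := ∀ (regs : List Int), Dom_register_to_int regs → Pre_register_to_int regs → Spec_register_to_int regs (register_to_int regs)

-- ===== LEMMAS AND PROOFS =====

-- the common value: the 16-bit chunks of regs, little-endian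
def pvS : List Int → Int
  | [] => 0
  | r :: t => r % 65536 + 65536 * pvS t

lemma pvS_nonneg (l : List Int) : 0 ≤ pvS l := by
  induction l with
  | nil => simp [pvS]
  | cons r t ih => simp only [pvS]; have := Int.emod_nonneg r (by norm_num : (65536:Int) ≠ 0); omega

lemma pvS_lt (l : List Int) : pvS l < 2 ^ (16 * l.length) := by
  induction l with
  | nil => simp [pvS]
  | cons r t ih =>
    simp only [pvS, List.length_cons]
    have h1 : r % 65536 < 65536 := Int.emod_lt_of_pos r (by norm_num)
    have h2 : (2:Int) ^ (16 * (t.length + 1)) = 65536 * 2 ^ (16 * t.length) := by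
      rw [show 16 * (t.length + 1) = 16 * t.length + 16 by ring, pow_add]; ring
    have := pvS_nonneg t
    nlinarith


lemma pv_band_mask (r : Int) : PySem.Int.band r 65535 = r % 65536 := by
  unfold PySem.Int.band
  split_ifs with h1 h2
  · rw [show ((65535:Int).toNat) = 2 ^ 16 - 1 from rfl, Nat.and_two_pow_sub_one_eq_mod]
    omega
  · omega
  · rw [show ((65535:Int).toNat) = 2 ^ 16 - 1 from rfl, Nat.land_comm, Nat.and_two_pow_sub_one_eq_mod]
    omega
  · omega

lemma pv_bor_add (a b : Int) (k : Nat) (h0 : 0 ≤ a) (h1 : a < 2 ^ k) (hb : 0 ≤ b) :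
    PySem.Int.bor a (b <<< k) = a + b * 2 ^ k := by
  have hbk : 0 ≤ b <<< k := by rw [Int.shiftLeft_eq]; positivity
  rw [PySem.Int.bor_of_nonneg h0 hbk]
  have hcast : (b <<< k).toNat = b.toNat <<< k := by
    rw [Int.shiftLeft_eq, Nat.shiftLeft_eq]
    have : b * 2 ^ k = ((b.toNat * 2 ^ k : Nat) : Int) := by
      push_cast [Int.toNat_of_nonneg hb]; ring
    rw [this, Int.toNat_natCast]
  have ha : a.toNat < 2 ^ k := by
    have : ((2 ^ k : Nat) : Int) = 2 ^ k := by push_cast; ring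
    omega
  rw [hcast, Nat.lor_comm, ← Nat.shiftLeft_add_eq_or_of_lt ha]
  push_cast [Nat.shiftLeft_eq, Int.toNat_of_nonneg h0, Int.toNat_of_nonneg hb]
  ring

lemma pv_band_two_pow (x : Int) (m : Nat) (h0 : 0 ≤ x) (h1 : x < 2 ^ (m + 1)) :
    (PySem.Int.band x ((2:Int) ^ m) ≠ 0) ↔ 2 ^ m ≤ x := by
  have hp : 0 ≤ ((2:Int) ^ m) := by positivity
  rw [PySem.Int.band_of_nonneg h0 hp]
  have hcast : ((2:Int) ^ m).toNat = 2 ^ m := by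
    have : ((2 ^ m : Nat) : Int) = 2 ^ m := by push_cast; ring
    omega
  have hx2 : x.toNat < 2 ^ (m+1) := by
    have : ((2 ^ (m+1) : Nat) : Int) = 2 ^ (m+1) := by push_cast; ring
    omega
  have hgoal : ((2 ^ m : Nat) : Int) = 2 ^ m := by push_cast; ring
  rw [hcast, Nat.and_two_pow]
  by_cases hc : x.toNat < 2 ^ m
  · rw [Nat.testBit_eq_false_of_lt hc]
    simp
    omega
  · have hdiv1 : x.toNat / 2 ^ m = 1 := by
      have hlo : 1 ≤ x.toNat / 2 ^ m := (Nat.one_le_div_iff (Nat.two_pow_pos m)).mpr (by omega)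
      have hhi : x.toNat / 2 ^ m < 2 := by
        rw [Nat.div_lt_iff_lt_mul (Nat.two_pow_pos m)]
        calc x.toNat < 2 ^ (m+1) := hx2
        _ = 2 * 2 ^ m := by ring
      omega
    have htb : x.toNat.testBit m = true := by
      simp [Nat.testBit, Nat.shiftRight_eq_div_pow, hdiv1]
    rw [htb]
    simp
    omega

lemma pv_foldA (l : List Int) : ∀ (i acc : Int), 0 ≤ i → 0 ≤ acc → acc < 2 ^ (16 * i.toNat) →
    (PySem.List.enumerate l i).foldl
      (fun result iv => PySem.Int.bor result ((PySem.Int.band iv.2 0xFFFF) <<< (16 * iv.1).toNat)) acc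
    = acc + 2 ^ (16 * i.toNat) * pvS l := by
  induction l with
  | nil => intro i acc _ _ _; simp [PySem.List.enumerate_nil, pvS]
  | cons r t ih =>
    intro i acc hi ha0 ha1
    rw [PySem.List.enumerate_cons, List.foldl_cons]
    have hv : PySem.Int.band r 0xFFFF = r % 65536 := pv_band_mask r
    have hv0 : 0 ≤ r % 65536 := Int.emod_nonneg r (by norm_num)
    have hv1 : r % 65536 < 65536 := Int.emod_lt_of_pos r (by norm_num)
    have hsh : (16 * i).toNat = 16 * i.toNat := by omega
    have hstep : PySem.Int.bor acc ((PySem.Int.band (i, r).2 0xFFFF) <<< ((((16 * (i, r).1).toNat) : Nat) : Int))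
        = acc + (r % 65536) * 2 ^ (16 * i.toNat) := by
      simp only [Int.shiftLeft_natCast_right]
      rw [hv, hsh]
      exact pv_bor_add acc (r % 65536) (16 * i.toNat) ha0 ha1 hv0
    have hpow : (2:Int) ^ (16 * ((i+1).toNat)) = 2 ^ (16 * i.toNat) * 65536 := by
      rw [show 16 * ((i+1).toNat) = 16 * i.toNat + 16 by omega, pow_add]
      norm_num
    have hacc1 : acc + (r % 65536) * 2 ^ (16 * i.toNat) < 2 ^ (16 * ((i+1).toNat)) := by
      rw [hpow]
      nlinarith [pow_pos (show (0:Int) < 2 by norm_num) (16 * i.toNat)]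
    have hacc0 : 0 ≤ acc + (r % 65536) * 2 ^ (16 * i.toNat) := by
      have := pow_pos (show (0:Int) < 2 by norm_num) (16 * i.toNat)
      nlinarith
    rw [hstep, ih (i+1) _ (by omega) hacc0 hacc1, hpow]
    simp only [pvS]
    ring

lemma pv_foldB (l : List Int) :
    (l.flatMap (fun reg =>
      let v := PySem.Int.band reg 0xFFFF
      [PySem.Int.mod v 256, PySem.Int.floordiv v 256])).foldr (fun b acc => b + 256 * acc) 0
    = pvS l := by
  induction l with
  | nil => simp [pvS]
  | cons r t ih =>
    rw [List.flatMap_cons, List.foldr_append]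
    simp only [List.foldr_cons, ih]
    have hv : PySem.Int.band r 0xFFFF = r % 65536 := pv_band_mask r
    have hv0 : 0 ≤ r % 65536 := Int.emod_nonneg r (by norm_num)
    rw [hv]
    have hm : PySem.Int.mod (r % 65536) 256 = (r % 65536) % 256 := by simp [pysem]
    have hd : PySem.Int.floordiv (r % 65536) 256 = (r % 65536) / 256 := by simp [pysem]
    simp only [hm, hd, List.foldr_nil, pvS]
    omega

-- ===== VERDICT (by name: the statement is the Claim_ definition above) =====
lemma pv_len (regs : List Int) :
    (regs.flatMap (fun reg =>
      [PySem.Int.mod (PySem.Int.band reg 0xFFFF) 256,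
       PySem.Int.floordiv (PySem.Int.band reg 0xFFFF) 256])).length = 2 * regs.length := by
  induction regs with
  | nil => simp
  | cons r t ih => simp [List.length_flatMap] at ih ⊢; omega

lemma pv_shift_cast (m : Nat) : ((1 <<< m : Nat) : Int) = 2 ^ m := by
  rw [Nat.shiftLeft_eq, one_mul]; push_cast; ring

theorem register_to_int_spec : Claim_equal_register_to_int := by
  intro regs _ hpre
  have hn : 0 < regs.length := List.length_pos_iff.mpr hpre
  unfold Spec_register_to_int register_to_int register_to_int_alt
  simp only []
  have hA := pv_foldA regs 0 0 (by norm_num) (by norm_num) (by norm_num)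
  simp only [Int.toNat_zero, Nat.mul_zero, pow_zero, one_mul, zero_add] at hA
  rw [hA]
  have hS0 := pvS_nonneg regs
  have hS1 := pvS_lt regs
  have hB := pv_foldB regs
  simp only [] at hB
  rw [PySem.List.foldl_append_eq_flatMap
    (fun reg => [PySem.Int.mod (PySem.Int.band reg 0xFFFF) 256,
                 PySem.Int.floordiv (PySem.Int.band reg 0xFFFF) 256]) regs []]
  simp only [List.nil_append]
  rw [hB, pv_len]
  have hlen1 : 8 * (2 * regs.length) - 1 = 16 * regs.length - 1 := by omega
  have hlen2 : 8 * (2 * regs.length) = 16 * regs.length := by omega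
  rw [hlen1, hlen2]
  have hsb : ((1 <<< (16 * regs.length - 1) : Nat) : Int) = (2:Int) ^ (16 * regs.length - 1) :=
    pv_shift_cast _
  have hfb : ((1 <<< (16 * regs.length) : Nat) : Int) = (2:Int) ^ (16 * regs.length) :=
    pv_shift_cast _
  rw [hsb, hfb]
  have hm1 : 16 * regs.length - 1 + 1 = 16 * regs.length := by omega
  have hcond := pv_band_two_pow (pvS regs) (16 * regs.length - 1) hS0 (by rw [hm1]; exact hS1)
  by_cases hc : 2 ^ (16 * regs.length - 1) ≤ pvS regs
  · rw [if_pos (hcond.mpr hc), if_pos ⟨by omega, hc⟩]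
  · rw [if_neg (fun h => hc (hcond.mp h)), if_neg (fun h => hc h.2)]
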